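-- pv_equiv track=rewrite | github.com/anjalief/framing_agenda_setting | src/frame_analysis/parse_frames.py | get_file_names
-- ===== SOURCE A (Python) =====
-- def get_file_names(input_files):
--     train_files = []
--     code_file_name = None
--     for filename in input_files:
--         if "meta" in filename:
--             continue
--         if "code" in filename:
--             code_file_name = filename
--             continue
--         train_files.append(filename)
--     return train_files, code_file_name
-- ===== SOURCE B (Python) =====
-- def get_file_names(input_files):
--     train_files = [f for f in input_files if "meta" not in f and "code" not in f]
--     code_file_name = next((f for f in reversed(input_files)
--                            if "code" in f and "meta" not in f), None)
--     return train_files, code_file_name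
-- ===== Notes on version B (the rewrite author's own statement) =====
-- stated objective: idiomatic
-- what changed: Replaces the single fused loop with two separately-shaped passes: a forward comprehension filtering out 'meta'/'code' names, and a short-circuiting backward scan (next over reversed) that picks the last code file or None.
import Mathlib
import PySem

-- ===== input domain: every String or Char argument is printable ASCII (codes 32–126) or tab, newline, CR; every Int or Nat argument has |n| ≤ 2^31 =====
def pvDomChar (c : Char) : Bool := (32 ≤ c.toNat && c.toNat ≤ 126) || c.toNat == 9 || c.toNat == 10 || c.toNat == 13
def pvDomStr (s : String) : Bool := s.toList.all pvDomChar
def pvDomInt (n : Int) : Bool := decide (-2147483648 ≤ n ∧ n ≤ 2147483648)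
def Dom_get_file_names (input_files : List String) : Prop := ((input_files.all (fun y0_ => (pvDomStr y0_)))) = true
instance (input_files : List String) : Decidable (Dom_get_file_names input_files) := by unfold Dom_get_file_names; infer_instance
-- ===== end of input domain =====

-- B splits A's fused loop into a forward filter comprehension and a backward short-circuiting scan for the last code file.


-- ===== PORT A =====
-- A's loop over input_files with state (train_files, code_file_name)
def get_file_names (input_files : List String) : List String × Option String :=
  input_files.foldl
    (fun st filename =>
      if PySem.Str.isIn "meta" filename then st
      else if PySem.Str.isIn "code" filename then (st.1, some filename)
      else (st.1 ++ [filename], st.2))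
    ([], none)

-- ===== PORT B =====
def get_file_names_alt (input_files : List String) : List String × Option String :=
  (input_files.filter
      (fun f => !PySem.Str.isIn "meta" f && !PySem.Str.isIn "code" f),
   input_files.reverse.find?
      (fun f => PySem.Str.isIn "code" f && !PySem.Str.isIn "meta" f))

-- ===== PRECONDITION & SPEC =====
def Spec_get_file_names (input_files : List String) (out : List String × Option String) : Prop := out = get_file_names_alt input_files
instance (input_files : List String) (out : List String × Option String) : Decidable (Spec_get_file_names input_files out) := by unfold Spec_get_file_names; infer_instance

-- ===== CLAIM (what is proved, stated in full; the proofs are below) =====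
def Claim_equal_get_file_names : Prop := ∀ (input_files : List String), Dom_get_file_names input_files → Spec_get_file_names input_files (get_file_names input_files)

-- ===== LEMMAS AND PROOFS =====
theorem get_file_names_loop (xs : List String) (a : List String) (c : Option String) :
    xs.foldl
      (fun st filename =>
        if PySem.Str.isIn "meta" filename then st
        else if PySem.Str.isIn "code" filename then (st.1, some filename)
        else (st.1 ++ [filename], st.2))
      (a, c)
    = (a ++ xs.filter (fun f => !PySem.Str.isIn "meta" f && !PySem.Str.isIn "code" f),
       (xs.reverse.find? (fun f => PySem.Str.isIn "code" f && !PySem.Str.isIn "meta" f)).or c) := by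
  induction xs generalizing a c with
  | nil => simp
  | cons x t ih =>
    simp only [List.foldl_cons, List.filter_cons, List.reverse_cons, List.find?_append,
      List.find?_cons, List.find?_nil]
    by_cases hm : PySem.Str.isIn "meta" x
    · rw [if_pos hm, ih, hm]
      simp
    · rw [if_neg hm]
      rw [Bool.not_eq_true] at hm
      by_cases hc : PySem.Str.isIn "code" x
      · rw [if_pos hc, ih, hm, hc]
        simp
      · rw [Bool.not_eq_true] at hc
        rw [if_neg (by rw [hc]; exact Bool.false_ne_true), ih, hm, hc]
        simp

-- ===== VERDICT (by name: the statement is the Claim_ definition above) =====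
theorem get_file_names_spec : Claim_equal_get_file_names := by
  intro xs _
  unfold Spec_get_file_names get_file_names get_file_names_alt
  rw [get_file_names_loop]
  simp
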